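-- pv_equiv track=rewrite | github.com/romandlcourcerccf/algo_trainning | sprint/22_hopper/22.py | hopper
-- ===== SOURCE A (Python) =====
-- def hopper(N, k):
--     ans = 0
--
--     steps = [0] * N
--     steps[0] = 1
--
--     for i in range(1, N):
--         if i <= k:
--             steps[i] = sum(steps[0:i])
--         else:
--             steps[i] = sum(steps[i-k:i])
--
--     return steps[-1]
-- ===== SOURCE B (Python) =====
-- def hopper(N, k):
--     # O(N) sliding-window via prefix sums: pref[j] = steps[0] + ... + steps[j-1]
--     pref = [0] * (N + 1)
--     pref[1] = 1                       # steps[0] = 1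
--     for i in range(1, N):
--         lo = min(max(i - k, 0), i)    # clamped left end of the window, like a slice bound
--         s = pref[i] - pref[lo]        # steps[i] = sum of the window, in O(1)
--         pref[i + 1] = pref[i] + s
--     return pref[N] - pref[N - 1]      # steps[N-1]
-- ===== Notes on version B (the rewrite author's own statement) =====
-- stated objective: faster
-- what changed: Replaces the per-step re-summation of a length-k slice by a prefix-sum array with O(1) window differences, dropping the inner scan.
import Mathlib
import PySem

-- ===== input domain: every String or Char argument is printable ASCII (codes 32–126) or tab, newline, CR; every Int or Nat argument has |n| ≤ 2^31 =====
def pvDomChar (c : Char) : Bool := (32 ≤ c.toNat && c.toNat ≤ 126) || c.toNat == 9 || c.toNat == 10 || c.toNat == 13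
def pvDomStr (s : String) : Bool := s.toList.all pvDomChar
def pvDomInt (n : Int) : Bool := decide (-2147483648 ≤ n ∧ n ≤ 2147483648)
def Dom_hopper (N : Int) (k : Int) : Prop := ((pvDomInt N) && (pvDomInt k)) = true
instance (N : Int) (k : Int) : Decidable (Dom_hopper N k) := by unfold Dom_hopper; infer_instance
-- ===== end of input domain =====

-- B replaces A's per-step windowed re-summation by a prefix-sum array updated with O(1) window differences.
-- Both ports model the Python list by an Array (Python lists are arrays); all indices and slice bounds that
-- the loops touch are nonnegative and in range (i ∈ [1,N), slice bounds clamped like Python's), so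
-- setIfInBounds / Array.getD / Array.extract are exact for the Python list operations on every input
-- admitted by Pre_ (1 ≤ N).

-- ===== PORT A =====
-- loop body of A's 'for i in range(1, N)': both slice bounds are ≥ 0 here (i ≥ 1, and i > k in the
-- else branch so i - k > 0), and extract clamps past-the-end starts/stops exactly like a Python slice
def hopperStepA (k : Int) (st : Array Int) (i : Int) : Array Int :=
  if i ≤ k then st.setIfInBounds i.toNat (st.extract 0 i.toNat).sum
  else st.setIfInBounds i.toNat (st.extract (i - k).toNat i.toNat).sum

def hopper (N : Int) (k : Int) : Int :=
  let steps := (Array.replicate N.toNat (0 : Int)).setIfInBounds 0 1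
  let steps := (PySem.List.pyRange 1 N 1).foldl (hopperStepA k) steps
  PySem.List.pyGetD steps.toList (-1) 0

-- ===== PORT B =====
-- loop body of B's 'for i in range(1, N)': 0 ≤ lo ≤ i and i + 1 ≤ N, all reads/writes in range
def hopperStepB (k : Int) (p : Array Int) (i : Int) : Array Int :=
  let lo := min (max (i - k) 0) i
  let s := p.getD i.toNat 0 - p.getD lo.toNat 0
  p.setIfInBounds (i + 1).toNat (p.getD i.toNat 0 + s)

def hopper_alt (N : Int) (k : Int) : Int :=
  let pref := (Array.replicate (N + 1).toNat (0 : Int)).setIfInBounds 1 1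
  let pref := (PySem.List.pyRange 1 N 1).foldl (hopperStepB k) pref
  pref.getD N.toNat 0 - pref.getD (N - 1).toNat 0

-- ===== PRECONDITION & SPEC =====
-- Both Python programs raise IndexError for N ≤ 0 (A on 'steps[0] = 1', B on 'pref[1] = 1').
def Pre_hopper (N : Int) (k : Int) : Prop := 1 ≤ N
instance (N : Int) (k : Int) : Decidable (Pre_hopper N k) := by unfold Pre_hopper; infer_instance
def pvWitness_hopper : Int × Int := (5, 2)

def Spec_hopper (N : Int) (k : Int) (out : Int) : Prop := out = hopper_alt N k
instance (N : Int) (k : Int) (out : Int) : Decidable (Spec_hopper N k out) := by unfold Spec_hopper; infer_instance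

-- ===== CLAIM (what is proved, stated in full; the proofs are below) =====
def Claim_equal_hopper : Prop := ∀ (N : Int) (k : Int), Dom_hopper N k → Pre_hopper N k → Spec_hopper N k (hopper N k)

-- ===== LEMMAS AND PROOFS =====

-- Array.getD through toList
lemma arr_getD_toList (a : Array Int) (i : Nat) (d : Int) : a.getD i d = a.toList.getD i d := by
  rw [Array.getD_eq_getD_getElem?, List.getD_eq_getElem?_getD, Array.getElem?_toList]

-- sum of a clamped sub-window equals a difference of prefix sums
lemma sum_drop_take (xs : List Int) (u v : Nat) (h : u ≤ v) :
    ((xs.drop u).take (v - u)).sum = (xs.take v).sum - (xs.take u).sum := by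
  have hsplit : xs.take v = xs.take u ++ (xs.drop u).take (v - u) := by
    rw [show v = u + (v - u) by omega, List.take_add, Nat.add_sub_cancel' h]
  rw [hsplit, List.sum_append]; ring

-- take of a list set at a later index
lemma take_set_of_le (xs : List Int) (m j : Nat) (v : Int) (h : j ≤ m) :
    (xs.set m v).take j = xs.take j := by
  apply List.ext_getElem
  · simp
  · intro i h1 h2
    have hij : i < j := by simp [List.length_take] at h1; omega
    simp only [List.getElem_take, List.getElem_set]
    rw [if_neg (by omega)]

-- the loop invariant: sizes, and pref[j] = sum(steps[:j]) for all j ≤ m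
lemma hopper_inv (k : Int) (n : Nat) (hn : 1 ≤ n) (m : Nat) (h1 : 1 ≤ m) (hm : m ≤ n) :
    ((PySem.List.pyRange 1 (m : Int) 1).foldl (hopperStepA k)
        ((Array.replicate n (0 : Int)).setIfInBounds 0 1)).size = n ∧
    ((PySem.List.pyRange 1 (m : Int) 1).foldl (hopperStepB k)
        ((Array.replicate (n + 1) (0 : Int)).setIfInBounds 1 1)).size = n + 1 ∧
    (∀ j : Nat, j ≤ m →
      ((PySem.List.pyRange 1 (m : Int) 1).foldl (hopperStepB k)
        ((Array.replicate (n + 1) (0 : Int)).setIfInBounds 1 1)).toList.getD j 0 =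
      (((PySem.List.pyRange 1 (m : Int) 1).foldl (hopperStepA k)
        ((Array.replicate n (0 : Int)).setIfInBounds 0 1)).toList.take j).sum) := by
  induction m, h1 using Nat.le_induction with
  | base =>
    have hr : PySem.List.pyRange 1 ((1 : Nat) : Int) 1 = [] :=
      PySem.List.pyRange_one_eq_nil (by norm_num)
    rw [hr]
    simp only [List.foldl_nil]
    refine ⟨by simp, by simp, ?_⟩
    intro j hj
    interval_cases j
    · simp
    · simp only [Array.toList_setIfInBounds, Array.toList_replicate]
      rcases n with _ | n'
      · omega
      · simp [List.replicate_succ]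
  | succ m h1 ih =>
    obtain ⟨hlA, hlB, hpref⟩ := ih (by omega)
    have hr : PySem.List.pyRange 1 ((m + 1 : Nat) : Int) 1
        = PySem.List.pyRange 1 (m : Int) 1 ++ [(m : Int)] := by
      push_cast
      exact PySem.List.pyRange_one_succ_right (by exact_mod_cast h1)
    rw [hr, List.foldl_append, List.foldl_append]
    set sa := (PySem.List.pyRange 1 (m : Int) 1).foldl (hopperStepA k)
        ((Array.replicate n (0 : Int)).setIfInBounds 0 1) with hsa
    set sb := (PySem.List.pyRange 1 (m : Int) 1).foldl (hopperStepB k)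
        ((Array.replicate (n + 1) (0 : Int)).setIfInBounds 1 1) with hsb
    simp only [List.foldl_cons, List.foldl_nil]
    -- the clamped left end of the window, as a Nat
    set lo : Int := min (max ((m : Int) - k) 0) (m : Int) with hlo
    have hlo0 : 0 ≤ lo := by omega
    have hlom : lo.toNat ≤ m := by omega
    have htn : ((m : Int)).toNat = m := Int.toNat_natCast m
    have htn1 : ((m : Int) + 1).toNat = m + 1 := by omega
    -- the value A assigns at position m equals B's window difference s
    have key : (if (m : Int) ≤ k then (sa.extract 0 m).sum
          else (sa.extract ((m : Int) - k).toNat m).sum)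
        = sb.toList.getD m 0 - sb.toList.getD lo.toNat 0 := by
      by_cases hk : (m : Int) ≤ k
      · rw [if_pos hk]
        have hlo' : lo = 0 := by omega
        rw [← Array.sum_toList, Array.toList_extract, List.extract_eq_take_drop, List.drop_zero, Nat.sub_zero,
          hpref m (le_refl m), hlo']
        have h0 := hpref 0 (by omega)
        simp only [List.take_zero, List.sum_nil, List.getD_eq_getElem?_getD,
          Array.getElem?_toList] at h0
        simp [h0]
      · rw [if_neg hk]
        have ha : (0 : Int) ≤ (m : Int) - k := by omega
        rw [← Array.sum_toList, Array.toList_extract, List.extract_eq_take_drop]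
        by_cases hk0 : 0 < k
        · -- 0 < k < m : a genuine window [m-k, m)
          have hlo' : lo = (m : Int) - k := by omega
          rw [sum_drop_take sa.toList _ m (by omega), hlo', hpref m (le_refl m),
            hpref ((m : Int) - k).toNat (by omega)]
        · -- k ≤ 0 : empty window, sum 0
          have hlo' : lo = (m : Int) := by omega
          have h0 : m - ((m : Int) - k).toNat = 0 := by omega
          rw [h0, hlo']
          simp
    -- unfold the two step functions
    simp only [hopperStepA, hopperStepB, ← hlo, htn, htn1, arr_getD_toList]
    rw [← apply_ite (sa.setIfInBounds m), key]
    set s : Int := sb.toList.getD m 0 - sb.toList.getD lo.toNat 0 with hs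
    refine ⟨by simp [hlA], by simp [hlB], ?_⟩
    intro j hj
    have hlA' : sa.toList.length = n := by simp [hlA]
    have hlB' : sb.toList.length = n + 1 := by simp [hlB]
    simp only [Array.toList_setIfInBounds]
    rcases Nat.lt_or_ge j (m + 1) with hjm | hjm
    · -- j ≤ m : both sides unchanged
      have hj' : j ≤ m := by omega
      rw [take_set_of_le sa.toList m j s (by omega)]
      rw [List.getD_eq_getElem?_getD, List.getElem?_set_ne (by omega),
        ← List.getD_eq_getElem?_getD]
      exact hpref j hj'
    · -- j = m + 1 : the new prefix entry
      have hj' : j = m + 1 := by omega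
      subst hj'
      have hidx : m < sa.toList.length := by omega
      have htake : (sa.toList.set m s).take (m + 1) = sa.toList.take m ++ [s] := by
        rw [List.take_add_one, take_set_of_le sa.toList m m s (le_refl m)]
        congr 1
        rw [List.getElem?_set_self (by omega)]
        rfl
      rw [htake, List.getD_eq_getElem?_getD, List.getElem?_set_self (by omega)]
      simp only [Option.getD_some, List.sum_append, List.sum_cons, List.sum_nil]
      rw [hpref m (le_refl m)]
      ring

-- ===== VERDICT (by name: the statement is the Claim_ definition above) =====
theorem hopper_spec : Claim_equal_hopper := by
  unfold Claim_equal_hopper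
  intro N k _ hN
  unfold Pre_hopper at hN
  unfold Spec_hopper hopper hopper_alt
  have hn : 1 ≤ N.toNat := by omega
  set n := N.toNat with hndef
  have hN1 : N = (n : Int) := by omega
  obtain ⟨hlA, hlB, hpref⟩ := hopper_inv k n hn n hn (le_refl n)
  rw [hN1]
  simp only [show ((n : Int) + 1).toNat = n + 1 by omega,
    show ((n : Int) - 1).toNat = n - 1 by omega]
  set sa := (PySem.List.pyRange 1 (n : Int) 1).foldl (hopperStepA k)
      ((Array.replicate n (0 : Int)).setIfInBounds 0 1) with hsa
  set sb := (PySem.List.pyRange 1 (n : Int) 1).foldl (hopperStepB k)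
      ((Array.replicate (n + 1) (0 : Int)).setIfInBounds 1 1) with hsb
  have hlA' : sa.toList.length = n := by simp [hlA]
  have hidx : n - 1 < sa.toList.length := by omega
  rw [PySem.List.pyGetD_neg_ofNat sa.toList 1 0 (by omega) (by omega),
    arr_getD_toList, arr_getD_toList, hpref n (le_refl n), hpref (n - 1) (by omega)]
  have h2 : sa.toList.take n = sa.toList.take (n - 1) ++ [sa.toList[n - 1]'hidx] := by
    conv_lhs => rw [show n = (n - 1) + 1 by omega]
    rw [List.take_add_one, List.getElem?_eq_getElem hidx]
    rfl
  have h3 : sa.toList[sa.toList.length - 1]'(by omega) = sa.toList[n - 1]'hidx := by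
    congr 1
    omega
  rw [h3, h2, List.sum_append, List.sum_cons, List.sum_nil]
  ring
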